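-- pv_equiv track=rewrite | github.com/0x1306e6d/algorithm | baekjoon/1107.py | zero_safe_permutation
-- ===== SOURCE A (Python) =====
-- def permutation(sequence, m):
--     for x in sequence:
--         if m == 1:
--             yield [x]
--         else:
--             sub_sequence = sequence.copy()
--             for sub_permutation in permutation(sub_sequence, m - 1):
--                 yield [x] + sub_permutation
--
-- def zero_safe_permutation(sequence, m):
--     for x in sequence:
--         if m == 1:
--             yield [x]
--         elif x == 0:
--             continue
--         else:
--             sub_sequence = sequence.copy()
--             for sub_permutation in permutation(sub_sequence, m - 1):
--                 yield [x] + sub_permutation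
-- ===== SOURCE B (Python) =====
-- def zero_safe_permutation(sequence, m):
--     seq = list(sequence)
--     prefixes = [[]]
--     for _ in range(m):
--         prefixes = [p + [x] for p in prefixes for x in seq]
--     for p in prefixes:
--         if m > 1 and p[0] == 0:
--             continue
--         yield p
-- ===== Notes on version B (the rewrite author's own statement) =====
-- stated objective: alternative
-- what changed: Replaces A's mutual recursion over m with an iterative breadth-first product: repeatedly right-extend a list of prefixes m times, then filter out tuples with a leading 0 when m > 1.
-- outside the precondition, e.g. on zero_safe_permutation([], 0): A returns [], B returns [[]]; on zero_safe_permutation([0], 0): A returns [], B returns [[]]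
import Mathlib
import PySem

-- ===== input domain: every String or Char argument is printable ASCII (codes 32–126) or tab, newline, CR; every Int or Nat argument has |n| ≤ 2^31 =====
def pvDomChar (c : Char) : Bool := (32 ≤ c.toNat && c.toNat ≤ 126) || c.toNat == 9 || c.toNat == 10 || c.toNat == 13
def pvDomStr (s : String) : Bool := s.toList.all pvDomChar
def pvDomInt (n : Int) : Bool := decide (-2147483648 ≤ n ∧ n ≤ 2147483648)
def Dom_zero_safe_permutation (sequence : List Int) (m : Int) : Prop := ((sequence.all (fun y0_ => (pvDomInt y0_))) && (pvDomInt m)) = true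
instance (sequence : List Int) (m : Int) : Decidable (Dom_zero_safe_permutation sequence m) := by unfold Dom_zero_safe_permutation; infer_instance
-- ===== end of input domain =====

-- B replaces A's recursion over m with an iterative product (build prefixes m times, then filter
-- leading zeros); same output and order, proved equal for m ≥ 1 (A recurses forever for m ≤ 0 on
-- inputs with a nonzero element, and returns [] otherwise, where B yields the empty product).


-- ===== PORT A =====
-- helper `permutation` from the same module; fuel n stands for Python's m ≥ 1 (n = m.toNat);
-- the n = 0 case is unreachable under Pre_ (Python diverges there).
def permA (seq : List Int) : Nat → List (List Int)
  | 0 => []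
  | Nat.succ n => seq.flatMap (fun x =>
      if n = 0 then [[x]]
      else (permA seq n).map (fun sub => x :: sub))

def zero_safe_permutation (sequence : List Int) (m : Int) : List (List Int) :=
  sequence.flatMap (fun x =>
    if m = 1 then [[x]]
    else if x = 0 then []
    else (permA sequence (m - 1).toNat).map (fun sub => x :: sub))

-- ===== PORT B =====
def zero_safe_permutation_alt (sequence : List Int) (m : Int) : List (List Int) :=
  (((PySem.List.pyRange 0 m 1).foldl
      (fun ps _ => ps.flatMap (fun p => sequence.map (fun x => p ++ [x]))) [[]]).flatMap
    (fun p => if m > 1 ∧ PySem.List.pyGet? p 0 = some 0 then [] else [p]))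

-- ===== PRECONDITION & SPEC =====
-- Pre_ excludes m ≤ 0: there A's recursion never reaches its base case, so consuming the
-- generator raises RecursionError whenever the sequence has a nonzero element, and on the
-- remaining (empty/all-zero) inputs A's empty yield is an accident of the missing base case
-- while B yields the empty product [[]] (see cites).
def Pre_zero_safe_permutation (sequence : List Int) (m : Int) : Prop := 1 ≤ m
instance (sequence : List Int) (m : Int) : Decidable (Pre_zero_safe_permutation sequence m) := by
  unfold Pre_zero_safe_permutation; infer_instance

def pvWitness_zero_safe_permutation : List Int × Int := ([0, 1, 2], 2)

def Spec_zero_safe_permutation (sequence : List Int) (m : Int) (out : List (List Int)) : Prop := out = zero_safe_permutation_alt sequence m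
instance (sequence : List Int) (m : Int) (out : List (List Int)) : Decidable (Spec_zero_safe_permutation sequence m out) := by unfold Spec_zero_safe_permutation; infer_instance

-- ===== CLAIM (what is proved, stated in full; the proofs are below) =====
def Claim_equal_zero_safe_permutation : Prop := ∀ (sequence : List Int) (m : Int), Dom_zero_safe_permutation sequence m → Pre_zero_safe_permutation sequence m → Spec_zero_safe_permutation sequence m (zero_safe_permutation sequence m)

-- ===== LEMMAS AND PROOFS =====

-- canonical left-built product: all length-n tuples over seq in A's (lex, leftmost-slowest) order
def tuples (seq : List Int) : Nat → List (List Int)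
  | 0 => [[]]
  | Nat.succ n => seq.flatMap (fun x => (tuples seq n).map (fun t => x :: t))

-- one right-extension step (B's loop body)
def rext (seq : List Int) (ps : List (List Int)) : List (List Int) :=
  ps.flatMap (fun p => seq.map (fun x => p ++ [x]))

theorem flatMap_one {α β : Type} (l : List α) (f : α → β) :
    l.flatMap (fun x => [f x]) = l.map f := by
  induction l <;> simp_all

theorem rext_cons_comm (seq : List Int) (l : List (List Int)) (x : Int) :
    rext seq (l.map (fun t => x :: t)) = (rext seq l).map (fun t => x :: t) := by
  simp [rext, List.flatMap_map, List.map_flatMap, List.map_map, Function.comp_def]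

theorem foldl_rext (seq : List Int) : ∀ (l : List Int) (init : List (List Int)),
    l.foldl (fun ps (_ : Int) => ps.flatMap (fun p => seq.map (fun x => p ++ [x]))) init
      = (rext seq)^[l.length] init := by
  intro l
  induction l with
  | nil => intro init; rfl
  | cons a l ih =>
      intro init
      simpa [List.foldl_cons, Function.iterate_succ_apply, rext] using ih (rext seq init)

theorem tuples_succ_right (seq : List Int) : ∀ n, tuples seq (n + 1) = rext seq (tuples seq n) := by
  intro n
  induction n with
  | zero => simp [tuples, rext, flatMap_one]
  | succ n ih =>
      calc tuples seq (n + 2)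
          = seq.flatMap (fun x => (rext seq (tuples seq n)).map (fun t => x :: t)) := by
            rw [show tuples seq (n + 2)
                  = seq.flatMap (fun x => (tuples seq (n + 1)).map (fun t => x :: t)) from rfl, ih]
        _ = seq.flatMap (fun x => rext seq ((tuples seq n).map (fun t => x :: t))) := by
            simp [rext_cons_comm]
        _ = rext seq (seq.flatMap (fun x => (tuples seq n).map (fun t => x :: t))) := by
            simp [rext, List.flatMap_assoc]
        _ = rext seq (tuples seq (n + 1)) := rfl

theorem iterate_rext (seq : List Int) : ∀ n, (rext seq)^[n] [[]] = tuples seq n := by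
  intro n
  induction n with
  | zero => rfl
  | succ n ih => rw [Function.iterate_succ_apply', ih, tuples_succ_right]

theorem permA_eq_tuples (seq : List Int) : ∀ n, permA seq (n + 1) = tuples seq (n + 1) := by
  intro n
  induction n with
  | zero => simp [permA, tuples]
  | succ n ih =>
      show permA seq (n + 2) = tuples seq (n + 2)
      rw [show permA seq (n + 2)
            = seq.flatMap (fun x => (permA seq (n + 1)).map (fun sub => x :: sub)) by
          simp [permA]]
      rw [ih]
      rfl

theorem length_range01 (m : Int) (h : 1 ≤ m) : (PySem.List.pyRange 0 m 1).length = m.toNat := by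
  rw [PySem.List.length_pyRange_one]; omega

-- ===== VERDICT (by name: the statement is the Claim_ definition above) =====
theorem zero_safe_permutation_spec : Claim_equal_zero_safe_permutation := by
  intro seq m _ hpre
  unfold Spec_zero_safe_permutation zero_safe_permutation zero_safe_permutation_alt
  have hpre' : (1 : Int) ≤ m := hpre
  rw [foldl_rext, length_range01 m hpre', iterate_rext]
  by_cases h1 : m = 1
  · subst h1
    simp [tuples]
  · have h2 : (2 : Int) ≤ m := by omega
    have hm : m.toNat = (m - 1).toNat + 1 := by omega
    have hn : (m - 1).toNat = ((m - 1).toNat - 1) + 1 := by omega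
    rw [hm, show tuples seq ((m - 1).toNat + 1)
          = seq.flatMap (fun x => (tuples seq ((m - 1).toNat)).map (fun t => x :: t)) from rfl]
    rw [hn, permA_eq_tuples]
    rw [List.flatMap_assoc]
    apply List.flatMap_congr
    intro x _
    rw [if_neg h1]
    by_cases hx : x = 0
    · subst hx
      rw [if_pos rfl]
      simp [List.flatMap_map, show (1 : Int) < m by omega]
    · rw [if_neg hx]
      simp [List.flatMap_map, hx, flatMap_one]
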